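-- pv_equiv track=rewrite | github.com/Upasana1807/placement-practice | lucky_number_from_binary.py | LuckyNumber
-- ===== SOURCE A (Python) =====
-- def LuckyNumber (n):
--     n= bin(n)
--     li= list(str(n))
--     li=li[2::]
--     if len(li)%2 :
--         li.insert(0, '0')
--     i=0
--     while(i< len(li)):
--         li[i], li[i+1] = li[i+1], li[i]
--         i+=2
--     return int(''.join(li),2)
-- ===== SOURCE B (Python) =====
-- # Swap adjacent bit pairs arithmetically, 2 bits at a time -- no string round-trip.
-- def LuckyNumber(n):
--     result = 0
--     place = 1
--     while n > 0:
--         pair = n % 4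
--         result += (pair // 2 + (pair % 2) * 2) * place
--         n //= 4
--         place *= 4
--     return result
-- ===== Notes on version B (the rewrite author's own statement) =====
-- stated objective: alternative
-- what changed: Replaces bin()/list/swap/int(...,2) string manipulation by a pure arithmetic loop that swaps each 2-bit group of n with // and % and reassembles the result by place values.
import Mathlib
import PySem

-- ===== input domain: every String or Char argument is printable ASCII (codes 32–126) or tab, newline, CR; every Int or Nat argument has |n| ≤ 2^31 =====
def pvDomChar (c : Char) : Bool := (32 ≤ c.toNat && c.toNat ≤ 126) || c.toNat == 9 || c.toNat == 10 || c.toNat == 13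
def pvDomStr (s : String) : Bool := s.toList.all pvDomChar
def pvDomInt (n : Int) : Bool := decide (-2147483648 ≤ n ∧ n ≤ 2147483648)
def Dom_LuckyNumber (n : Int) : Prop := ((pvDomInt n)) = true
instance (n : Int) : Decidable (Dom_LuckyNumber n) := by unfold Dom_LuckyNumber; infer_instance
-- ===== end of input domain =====

-- B swaps the adjacent bit pairs of n arithmetically (base-4 digit loop) instead of A's
-- bin()/list/swap/int(...,2) string round-trip; same value on every n ≥ 0 (A raises ValueError for n < 0).

-- ===== PORT A =====

-- binary digits of m, most significant first (the digits of bin(m) after the '0b' prefix, m > 0)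
def bitsN (m : Nat) : List Char :=
  if h : m = 0 then [] else bitsN (m / 2) ++ [if m % 2 = 1 then '1' else '0']
decreasing_by exact Nat.div_lt_self (Nat.pos_of_ne_zero h) (by omega)

-- bin(n) as its list of characters (list(str(bin(n))) is exactly this character list)
def pyBin (n : Int) : List Char :=
  if n < 0 then '-' :: '0' :: 'b' :: (if (-n).toNat = 0 then ['0'] else bitsN (-n).toNat)
  else '0' :: 'b' :: (if n.toNat = 0 then ['0'] else bitsN n.toNat)

-- the while loop: swap li[i], li[i+1] for i = 0, 2, 4, …; the list it is run on always has
-- even length, so the single-element case below is never reached on A's actual data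
def swapA : List Char → List Char
  | a :: b :: t => b :: a :: swapA t
  | t => t

-- int(''.join(li), 2): none = ValueError (empty string or a character that is not a binary digit);
-- exact for the strings reachable here, which contain no sign/whitespace/underscore
def parseBin2 (l : List Char) : Option Int :=
  if l.isEmpty || l.any (fun c => !(c == '0' || c == '1')) then none
  else some (l.foldl (fun a c => 2 * a + (if c = '1' then 1 else 0)) 0)

def LuckyNumber (n : Int) : Int :=
  let li := pyBin n
  let li := PySem.List.slice li (some 2) none       -- li[2::]
  let li := if li.length % 2 = 1 then '0' :: li else li   -- li.insert(0, '0') when len odd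
  let li := swapA li
  (parseBin2 li).getD 0   -- none = ValueError, excluded by Pre_LuckyNumber

-- ===== PORT B =====

def altLoop (n result place : Int) : Int :=
  if h : n > 0 then
    let pair := PySem.Int.mod n 4
    altLoop (PySem.Int.floordiv n 4)
      (result + (PySem.Int.floordiv pair 2 + PySem.Int.mod pair 2 * 2) * place)
      (place * 4)
  else result
termination_by n.toNat
decreasing_by
  rw [PySem.Int.floordiv_eq_ediv_of_pos (by omega)]
  omega

def LuckyNumber_alt (n : Int) : Int := altLoop n 0 1

-- ===== PRECONDITION & SPEC =====
-- A raises ValueError for n < 0 (the '-'/'b' characters reach int(...,2)); Pre_ excludes exactly those.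
def Pre_LuckyNumber (n : Int) : Prop := 0 ≤ n
instance (n : Int) : Decidable (Pre_LuckyNumber n) := by unfold Pre_LuckyNumber; infer_instance
def pvWitness_LuckyNumber : Int := 6

def Spec_LuckyNumber (n : Int) (out : Int) : Prop := out = LuckyNumber_alt n
instance (n : Int) (out : Int) : Decidable (Spec_LuckyNumber n out) := by unfold Spec_LuckyNumber; infer_instance

-- ===== CLAIM (what is proved, stated in full; the proofs are below) =====
def Claim_equal_LuckyNumber : Prop := ∀ (n : Int), Dom_LuckyNumber n → Pre_LuckyNumber n → Spec_LuckyNumber n (LuckyNumber n)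

-- ===== LEMMAS AND PROOFS =====

-- reference function: sw m swaps the adjacent bit pairs of m
def swap2 (r : Nat) : Nat := 2 * (r % 2) + r / 2

def sw (m : Nat) : Nat :=
  if h : m = 0 then 0 else 4 * sw (m / 4) + swap2 (m % 4)
decreasing_by exact Nat.div_lt_self (Nat.pos_of_ne_zero h) (by omega)

lemma sw_zero : sw 0 = 0 := by rw [sw]; simp

lemma sw_eq (m : Nat) : sw m = 4 * sw (m / 4) + swap2 (m % 4) := by
  by_cases h : m = 0
  · subst h; simp [sw_zero, swap2]
  · rw [sw]; simp [h]

-- B side --------------------------------------------------------------------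

lemma altLoop_eq (k : Nat) : ∀ r p : Int, altLoop (k : Int) r p = r + p * (sw k : Int) := by
  induction k using Nat.strong_induction_on with
  | _ k ih =>
    intro r p
    by_cases hk : k = 0
    · subst hk; rw [altLoop]; simp [sw_zero]
    · rw [altLoop]
      have hpos : (k : Int) > 0 := by omega
      simp only [hpos, dif_pos]
      rw [PySem.Int.mod_eq_emod_of_pos (by omega : (0:Int) < 4),
          PySem.Int.floordiv_eq_ediv_of_pos (by omega : (0:Int) < 4),
          PySem.Int.mod_eq_emod_of_pos (by omega : (0:Int) < 2),
          PySem.Int.floordiv_eq_ediv_of_pos (by omega : (0:Int) < 2)]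
      have hq : (k : Int) / 4 = ((k / 4 : Nat) : Int) := by omega
      rw [hq, ih (k / 4) (Nat.div_lt_self (Nat.pos_of_ne_zero hk) (by omega))]
      have hs : ((k : Int) % 4) / 2 + ((k : Int) % 4) % 2 * 2 = ((swap2 (k % 4) : Nat) : Int) := by
        unfold swap2; omega
      rw [hs, sw_eq k]
      push_cast
      ring

lemma alt_eq_sw (n : Int) (hn : 0 ≤ n) : LuckyNumber_alt n = (sw n.toNat : Int) := by
  unfold LuckyNumber_alt
  have h : (n.toNat : Int) = n := Int.toNat_of_nonneg hn
  have h2 : altLoop n 0 1 = altLoop ((n.toNat : Nat) : Int) 0 1 := by rw [h]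
  rw [h2, altLoop_eq]
  ring

-- A side --------------------------------------------------------------------

def cv (c : Char) : Nat := if c = '1' then 1 else 0

def valL (l : List Char) : Nat := l.foldl (fun a c => 2 * a + cv c) 0

lemma cv_le_one (c : Char) : cv c ≤ 1 := by unfold cv; split <;> omega

lemma foldl_val (l : List Char) : ∀ a : Nat,
    l.foldl (fun a c => 2 * a + cv c) a = a * 2 ^ l.length + valL l := by
  induction l with
  | nil => intro a; simp [valL]
  | cons c t ih =>
    intro a
    simp only [List.foldl_cons, List.length_cons]
    rw [ih (2 * a + cv c)]
    have hv : valL (c :: t) = (2 * 0 + cv c) * 2 ^ t.length + valL t := by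
      unfold valL; simp only [List.foldl_cons]; exact ih (2 * 0 + cv c)
    rw [hv]; ring

lemma valL_cons (c : Char) (t : List Char) : valL (c :: t) = cv c * 2 ^ t.length + valL t := by
  have h0 : valL (c :: t) = List.foldl (fun a c => 2 * a + cv c) (2 * 0 + cv c) t := rfl
  rw [h0, foldl_val t (2 * 0 + cv c)]
  ring

lemma valL_lt (l : List Char) : valL l < 2 ^ l.length := by
  induction l with
  | nil => simp [valL]
  | cons c t ih =>
    rw [valL_cons]
    have := cv_le_one c
    simp only [List.length_cons, pow_succ]
    nlinarith

-- key carry lemma: sw distributes over a high base-4 digit block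
lemma sw_carry (k : Nat) : ∀ c t : Nat, c < 4 → t < 4 ^ k →
    sw (c * 4 ^ k + t) = swap2 c * 4 ^ k + sw t := by
  induction k with
  | zero =>
    intro c t hc ht
    interval_cases t
    simp only [pow_zero, mul_one, add_zero, sw_zero]
    rw [sw_eq c]
    have h1 : c / 4 = 0 := by omega
    have h2 : c % 4 = c := by omega
    simp [h1, h2, sw_zero]
  | succ k ih =>
    intro c t hc ht
    have hp : (4 : Nat) ^ (k + 1) = 4 * 4 ^ k := by ring
    rw [hp] at ht ⊢
    have hc4 : c * (4 * 4 ^ k) = 4 * (c * 4 ^ k) := by ring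
    rw [hc4, sw_eq (4 * (c * 4 ^ k) + t)]
    have hdiv : (4 * (c * 4 ^ k) + t) / 4 = c * 4 ^ k + t / 4 := by omega
    have hmod : (4 * (c * 4 ^ k) + t) % 4 = t % 4 := by omega
    rw [hdiv, hmod, ih c (t / 4) hc (by omega), sw_eq t]
    ring

lemma swapA_length : ∀ t : List Char, (swapA t).length = t.length := by
  intro t
  induction t using swapA.induct with
  | case1 a b t ih => simp [swapA, ih]
  | case2 t h =>
    cases t with
    | nil => rfl
    | cons x xs =>
      cases xs with
      | nil => rfl
      | cons y ys => exact absurd rfl (h x y ys)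

lemma valL_swapA : ∀ l : List Char, l.length % 2 = 0 → valL (swapA l) = sw (valL l) := by
  intro l
  induction l using swapA.induct with
  | case1 a b t ih =>
    intro hlen
    have ht : t.length % 2 = 0 := by simp at hlen; omega
    rw [show swapA (a :: b :: t) = b :: a :: swapA t from rfl]
    simp only [valL_cons, List.length_cons, swapA_length]
    rw [ih ht]
    obtain ⟨k, hk⟩ : ∃ k, t.length = 2 * k := ⟨t.length / 2, by omega⟩
    have p0 : (2 : Nat) ^ t.length = 4 ^ k := by rw [hk, pow_mul]; norm_num
    have p1 : (2 : Nat) ^ (t.length + 1) = 2 * 4 ^ k := by rw [pow_succ, p0]; ring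
    rw [p0, p1]
    have hR : cv a * (2 * 4 ^ k) + (cv b * 4 ^ k + valL t)
        = (2 * cv a + cv b) * 4 ^ k + valL t := by ring
    rw [hR, sw_carry k (2 * cv a + cv b) (valL t)
        (by have := cv_le_one a; have := cv_le_one b; omega)
        (by have := valL_lt t; rw [p0] at this; exact this)]
    have h2 : swap2 (2 * cv a + cv b) = 2 * cv b + cv a := by
      have := cv_le_one a; have := cv_le_one b; unfold swap2; omega
    rw [h2]; ring
  | case2 t h =>
    intro _
    cases t with
    | nil => simp [swapA, valL, sw_zero]
    | cons x xs =>
      cases xs with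
      | nil => simp at *
      | cons y ys => exact absurd rfl (h x y ys)

lemma bitsN_chars : ∀ m : Nat, ∀ c ∈ bitsN m, c = '0' ∨ c = '1' := by
  intro m
  induction m using Nat.strong_induction_on with
  | _ m ih =>
    intro c hc
    by_cases h : m = 0
    · subst h; rw [bitsN] at hc; simp at hc
    · rw [bitsN] at hc
      simp only [h, dif_neg, not_false_iff, List.mem_append, List.mem_singleton] at hc
      rcases hc with hc | hc
      · exact ih (m / 2) (Nat.div_lt_self (Nat.pos_of_ne_zero h) (by omega)) c hc
      · subst hc; split <;> simp

lemma valL_bitsN : ∀ m : Nat, valL (bitsN m) = m := by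
  intro m
  induction m using Nat.strong_induction_on with
  | _ m ih =>
    by_cases h : m = 0
    · subst h; rw [bitsN]; simp [valL]
    · rw [bitsN]
      simp only [h, dif_neg, not_false_iff]
      unfold valL
      rw [List.foldl_append]
      have h1 := ih (m / 2) (Nat.div_lt_self (Nat.pos_of_ne_zero h) (by omega))
      unfold valL at h1
      rw [h1]
      simp only [List.foldl_cons, List.foldl_nil]
      have h2 : cv (if m % 2 = 1 then '1' else '0') = m % 2 := by
        unfold cv; split <;> simp_all
      rw [h2]; omega

-- folding over Int computes the cast of the Nat fold
lemma foldl_int_val (l : List Char) : ∀ a : Nat,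
    l.foldl (fun (a : Int) c => 2 * a + (if c = '1' then 1 else 0)) (a : Int)
      = ((l.foldl (fun a c => 2 * a + cv c) a : Nat) : Int) := by
  induction l with
  | nil => intro a; simp
  | cons c t ih =>
    intro a
    simp only [List.foldl_cons]
    have h : (2 * (a : Int) + (if c = '1' then 1 else 0)) = ((2 * a + cv c : Nat) : Int) := by
      unfold cv; split <;> push_cast <;> ring
    rw [h, ih]

lemma parseBin2_of_bits (l : List Char) (hne : l ≠ [])
    (hb : ∀ c ∈ l, c = '0' ∨ c = '1') : parseBin2 l = some ((valL l : Nat) : Int) := by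
  unfold parseBin2
  have h1 : l.isEmpty = false := by simp [hne]
  have h2 : l.any (fun c => !(c == '0' || c == '1')) = false := by
    simp only [List.any_eq_false]
    intro c hc
    rcases hb c hc with h | h <;> subst h <;> simp
  rw [h1, h2]
  simp only [Bool.or_self, if_neg Bool.false_ne_true]
  exact congrArg some (by simpa [valL] using foldl_int_val l 0)

lemma swapA_chars : ∀ l : List Char, (∀ c ∈ l, c = '0' ∨ c = '1') →
    ∀ c ∈ swapA l, c = '0' ∨ c = '1' := by
  intro l
  induction l using swapA.induct with
  | case1 a b t ih =>
    intro hb c hc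
    rw [show swapA (a :: b :: t) = b :: a :: swapA t from rfl] at hc
    rcases List.mem_cons.mp hc with h | hc2
    · exact hb c (by subst h; simp)
    rcases List.mem_cons.mp hc2 with h | h3
    · exact hb c (by subst h; simp)
    · exact ih (fun d hd => hb d (by simp [hd])) c h3
  | case2 t h =>
    intro hb c hc
    cases t with
    | nil => exact hb c hc
    | cons x xs =>
      cases xs with
      | nil => exact hb c hc
      | cons y ys => exact absurd rfl (h x y ys)

lemma swapA_ne_nil (l : List Char) (h : l ≠ []) : swapA l ≠ [] := by
  cases l with
  | nil => exact absurd rfl h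
  | cons x xs =>
    cases xs with
    | nil => simp [swapA]
    | cons y ys => simp [swapA]

lemma lucky_eq_sw (n : Int) (hn : 0 ≤ n) : LuckyNumber n = (sw n.toNat : Int) := by
  unfold LuckyNumber pyBin
  have hneg : ¬ (n < 0) := by omega
  simp only [hneg, if_neg, not_false_iff]
  set L : List Char := if n.toNat = 0 then ['0'] else bitsN n.toNat with hL
  have hdrop : PySem.List.slice ('0' :: 'b' :: L) (some 2) none = L := by
    have h := PySem.List.slice_from_natCast ('0' :: 'b' :: L) 2
    simpa using h
  rw [hdrop]
  have hLchars : ∀ c ∈ L, c = '0' ∨ c = '1' := by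
    rw [hL]; split
    · intro c hc; simp at hc; left; exact hc
    · exact bitsN_chars n.toNat
  have hLval : valL L = n.toNat := by
    rw [hL]; split
    · rename_i h0
      have hv : valL ['0'] = 0 := by decide
      omega
    · exact valL_bitsN n.toNat
  have hLne : L ≠ [] := by
    rw [hL]; split
    · simp
    · rename_i h0
      rw [bitsN, dif_neg h0]
      simp
  set P : List Char := if L.length % 2 = 1 then '0' :: L else L with hP
  have hPchars : ∀ c ∈ P, c = '0' ∨ c = '1' := by
    rw [hP]; split
    · intro c hc
      rcases List.mem_cons.mp hc with h | h
      · left; exact h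
      · exact hLchars c h
    · exact hLchars
  have hPval : valL P = n.toNat := by
    rw [hP]; split
    · rw [valL_cons]
      have hc0 : cv '0' = 0 := by decide
      rw [hc0, hLval]; ring
    · exact hLval
  have hPne : P ≠ [] := by
    rw [hP]; split
    · simp
    · exact hLne
  have hPeven : P.length % 2 = 0 := by
    rw [hP]
    split <;> rename_i h
    · simp only [List.length_cons]; omega
    · omega
  rw [parseBin2_of_bits (swapA P) (swapA_ne_nil P hPne) (swapA_chars P hPchars)]
  rw [valL_swapA P hPeven, hPval]
  rfl

-- ===== VERDICT (by name: the statement is the Claim_ definition above) =====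
theorem LuckyNumber_spec : Claim_equal_LuckyNumber := by
  intro n _ hpre
  unfold Spec_LuckyNumber
  rw [lucky_eq_sw n hpre, alt_eq_sw n hpre]
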